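-- pv_equiv track=rewrite | github.com/prash21/FIT2004_3 | trie.py | splitNewLine
-- ===== SOURCE A (Python) =====
-- def splitNewLine(file):
--     """
--     This function splits the rows in the database file (between newlines).
--     Time complexity:  Best: O(NM)
--                       Worst: O(NM)
--     Space complexity:  Best: O(NM)
--                        Worst: O(NM)
--     Error handle: None
--     Return: A list with each row in the database file.
--     Parameter: file, which is the data from the database file.
--     Precondition: The parameter must be a list with each row as an item in it.
--     """
--     word=""
--     input_file=[]
--     for index in range(len(file)):
--         # If the current character is not a newline, it is added to the list.
--         if file[index] != '\n':
--             word += file[index]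
--
--             if index == (len(file) - 1):
--                 input_file.append(word)
--         else:
--             # Basically gets split when there is a newline.
--             input_file.append(word)
--             word = ""
--     return input_file
-- ===== SOURCE B (Python) =====
-- def splitNewLine(file):
--     rows = file.split('\n')
--     if rows and rows[-1] == '':
--         rows.pop()
--     return rows
-- ===== Notes on version B (the rewrite author's own statement) =====
-- stated objective: faster
-- what changed: Replaces the manual per-character accumulation loop with a single str.split call plus dropping the trailing empty segment that A's end-of-string rule never emits.
import Mathlib
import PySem

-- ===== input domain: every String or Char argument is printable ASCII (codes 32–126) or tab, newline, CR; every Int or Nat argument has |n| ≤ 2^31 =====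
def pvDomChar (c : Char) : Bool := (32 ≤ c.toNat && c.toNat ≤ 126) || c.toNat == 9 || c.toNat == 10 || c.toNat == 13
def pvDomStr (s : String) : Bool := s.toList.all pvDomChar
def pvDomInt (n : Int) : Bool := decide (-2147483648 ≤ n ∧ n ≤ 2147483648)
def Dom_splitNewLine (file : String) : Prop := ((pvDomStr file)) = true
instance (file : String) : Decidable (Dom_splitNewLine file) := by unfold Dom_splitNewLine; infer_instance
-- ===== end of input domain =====

-- B replaces A's per-character accumulation loop by one split('\n') call plus dropping the
-- trailing empty segment (idiomatic); equivalence is proved for the return value on all strings.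

-- ===== PORT A =====
-- loop body of A: state = (word, input_file); i is the running index into cs
def splitNewLineStep (cs : List Char) (st : List Char × List (List Char)) (i : Int) :
    List Char × List (List Char) :=
  if PySem.List.pyGetD cs i ' ' ≠ '\n' then
    let word := st.1 ++ [PySem.List.pyGetD cs i ' ']
    if i = (cs.length : Int) - 1 then (word, st.2 ++ [word]) else (word, st.2)
  else ([], st.2 ++ [st.1])

def splitNewLine (file : String) : List String :=
  let cs := file.toList
  (((PySem.List.pyRange 0 (cs.length : Int) 1).foldl (splitNewLineStep cs) ([], [])).2).map
    String.ofList

-- ===== PORT B =====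
def splitNewLine_alt (file : String) : List String :=
  let rows := PySem.Chars.splitOn file.toList ['\n']
  let rows := if rows.getLast? = some [] then rows.dropLast else rows
  rows.map String.ofList

-- ===== PRECONDITION & SPEC =====
def Spec_splitNewLine (file : String) (out : List String) : Prop := out = splitNewLine_alt file
instance (file : String) (out : List String) : Decidable (Spec_splitNewLine file out) := by unfold Spec_splitNewLine; infer_instance

-- ===== CLAIM (what is proved, stated in full; the proofs are below) =====
def Claim_equal_splitNewLine : Prop := ∀ (file : String), Dom_splitNewLine file → Spec_splitNewLine file (splitNewLine file)

-- ===== LEMMAS AND PROOFS =====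

-- Pure list-level splitter on '\n': always returns at least one segment.
def pvSegs : List Char → List (List Char)
  | [] => [[]]
  | c :: r =>
    match pvSegs r with
    | [] => []
    | h :: t => if c = '\n' then [] :: h :: t else (c :: h) :: t

-- prepend chars to the first segment
def pvConsHead (w : List Char) : List (List Char) → List (List Char)
  | [] => [w]
  | h :: t => (w ++ h) :: t

-- drop a trailing empty segment
def pvPopEmpty (xs : List (List Char)) : List (List Char) :=
  if xs.getLast? = some [] then xs.dropLast else xs

-- structural form of A's loop
def pvPairA : List Char → List Char → List (List Char) → List Char × List (List Char)
  | [], w, o => (w, o)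
  | c :: rest, w, o =>
    if c = '\n' then pvPairA rest [] (o ++ [w])
    else if rest = [] then (w ++ [c], o ++ [w ++ [c]])
    else pvPairA rest (w ++ [c]) o

theorem pvSegs_cons (c : Char) (r h : List Char) (t : List (List Char)) (hs : pvSegs r = h :: t) :
    pvSegs (c :: r) = if c = '\n' then [] :: h :: t else (c :: h) :: t := by
  rw [pvSegs, hs]

theorem pvSegs_ne_nil (l : List Char) : pvSegs l ≠ [] := by
  induction l with
  | nil => simp [pvSegs]
  | cons c r ih =>
    cases h : pvSegs r with
    | nil => exact absurd h ih
    | cons a b => rw [pvSegs_cons c r a b h]; split <;> simp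

-- PySem.Chars.splitOn.go on separator ['\n'] computes pvConsHead/pvSegs
theorem pvGo_eq (fuel : Nat) : ∀ (l cur : List Char) (acc : List (List Char)),
    l.length < fuel →
    PySem.Chars.splitOn.go ['\n'] fuel l cur acc = acc.reverse ++ pvConsHead cur.reverse (pvSegs l) := by
  induction fuel with
  | zero => intro l cur acc h; omega
  | succ fuel ih =>
    intro l cur acc h
    cases l with
    | nil => simp [PySem.Chars.splitOn.go, pvSegs, pvConsHead]
    | cons c rest =>
      by_cases hc : c = '\n'
      · subst hc
        have hpre : List.isPrefixOf ['\n'] ('\n' :: rest) = true := by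
          simp [List.isPrefixOf]
        rw [show PySem.Chars.splitOn.go ['\n'] (fuel + 1) ('\n' :: rest) cur acc
            = PySem.Chars.splitOn.go ['\n'] fuel (List.drop (List.length ['\n']) ('\n' :: rest)) [] (cur.reverse :: acc) by
          simp [PySem.Chars.splitOn.go, hpre]]
        simp only [List.length_singleton, List.drop_succ_cons, List.drop_zero]
        rw [ih rest [] (cur.reverse :: acc) (by simpa using Nat.lt_of_succ_lt_succ h)]
        simp only [pvSegs]
        cases hs : pvSegs rest with
        | nil => exact absurd hs (pvSegs_ne_nil rest)
        | cons a b => simp [pvConsHead]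
      · have hpre : List.isPrefixOf ['\n'] (c :: rest) = false := by
          simp [List.isPrefixOf, Ne.symm hc]
        rw [show PySem.Chars.splitOn.go ['\n'] (fuel + 1) (c :: rest) cur acc
            = PySem.Chars.splitOn.go ['\n'] fuel rest (c :: cur) acc by
          simp [PySem.Chars.splitOn.go, hpre]]
        rw [ih rest (c :: cur) acc (by simpa using Nat.lt_of_succ_lt_succ h)]
        simp only [pvSegs]
        cases hs : pvSegs rest with
        | nil => exact absurd hs (pvSegs_ne_nil rest)
        | cons a b => simp [pvConsHead, hc]

theorem pvSplitOn_eq (cs : List Char) : PySem.Chars.splitOn cs ['\n'] = pvSegs cs := by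
  rw [show PySem.Chars.splitOn cs ['\n'] = PySem.Chars.splitOn.go ['\n'] (cs.length + 1) cs [] [] from rfl,
    pvGo_eq (cs.length + 1) cs [] [] (by omega)]
  cases hs : pvSegs cs with
  | nil => exact absurd hs (pvSegs_ne_nil cs)
  | cons a b => simp [pvConsHead]

theorem pvPopEmpty_cons (x : List Char) (xs : List (List Char)) (h : xs ≠ []) :
    pvPopEmpty (x :: xs) = x :: pvPopEmpty xs := by
  unfold pvPopEmpty
  cases xs with
  | nil => exact absurd rfl h
  | cons y ys =>
    rw [List.getLast?_cons_cons]
    split <;> simp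

-- A's structural loop produces exactly "segments with the trailing empty one dropped"
theorem pvPairA_snd : ∀ (suf w : List Char) (o : List (List Char)), suf ≠ [] →
    (pvPairA suf w o).2 = o ++ pvPopEmpty (pvConsHead w (pvSegs suf)) := by
  intro suf
  induction suf with
  | nil => intro w o h; exact absurd rfl h
  | cons c rest ih =>
    intro w o _
    by_cases hc : c = '\n'
    · subst hc
      cases rest with
      | nil => simp [pvPairA, pvSegs, pvConsHead, pvPopEmpty]
      | cons d r =>
        rw [show pvPairA ('\n' :: d :: r) w o = pvPairA (d :: r) [] (o ++ [w]) from by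
          simp [pvPairA]]
        rw [ih [] (o ++ [w]) (by simp)]
        cases hs : pvSegs (d :: r) with
        | nil => exact absurd hs (pvSegs_ne_nil _)
        | cons a b =>
          rw [pvSegs_cons '\n' (d :: r) a b hs, if_pos rfl]
          simp [pvConsHead, pvPopEmpty_cons w (a :: b) (by simp)]
    · cases rest with
      | nil => simp [pvPairA, pvSegs, pvConsHead, pvPopEmpty, hc]
      | cons d r =>
        rw [show pvPairA (c :: d :: r) w o = pvPairA (d :: r) (w ++ [c]) o from by
          simp [pvPairA, hc]]
        rw [ih (w ++ [c]) o (by simp)]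
        cases hs : pvSegs (d :: r) with
        | nil => exact absurd hs (pvSegs_ne_nil _)
        | cons a b =>
          rw [pvSegs_cons c (d :: r) a b hs, if_neg hc]
          simp [pvConsHead]

-- A's index fold equals the structural loop on the corresponding suffix
theorem pvFoldA_eq (cs : List Char) : ∀ (m k : Nat), cs.length - k = m →
    ∀ (w : List Char) (o : List (List Char)),
    (PySem.List.pyRange (k : Int) (cs.length : Int) 1).foldl (splitNewLineStep cs) (w, o)
      = pvPairA (cs.drop k) w o := by
  intro m
  induction m with
  | zero =>
    intro k hk w o
    have hk' : cs.length ≤ k := by omega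
    rw [PySem.List.pyRange_one_eq_nil (by exact_mod_cast hk'), List.drop_eq_nil_of_le hk']
    simp [pvPairA]
  | succ m ih =>
    intro k hk w o
    have hlt : k < cs.length := by omega
    rw [PySem.List.pyRange_one_cons (by exact_mod_cast hlt), List.foldl_cons]
    have hget : PySem.List.pyGetD cs (k : Int) ' ' = cs[k] := by
      rw [PySem.List.pyGetD_natCast]; simp [List.getD, hlt]
    have hdrop : cs.drop k = cs[k] :: cs.drop (k + 1) := List.drop_eq_getElem_cons hlt
    rw [hdrop]
    by_cases hc : cs[k] = '\n'
    · have : splitNewLineStep cs (w, o) (k : Int) = ([], o ++ [w]) := by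
        simp [splitNewLineStep, hget, hc]
      rw [this, show ((k : Int) + 1) = ((k + 1 : Nat) : Int) by push_cast; ring,
        ih (k + 1) (by omega) [] (o ++ [w])]
      simp [pvPairA, hc]
    · by_cases hlast : k = cs.length - 1
      · have hkeq : (k : Int) = (cs.length : Int) - 1 := by omega
        have : splitNewLineStep cs (w, o) (k : Int) = (w ++ [cs[k]], o ++ [w ++ [cs[k]]]) := by
          unfold splitNewLineStep
          rw [hget, if_pos hc, if_pos hkeq]
        rw [this, show ((k : Int) + 1) = ((k + 1 : Nat) : Int) by push_cast; ring,
          ih (k + 1) (by omega) (w ++ [cs[k]]) (o ++ [w ++ [cs[k]]])]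
        have hnil : cs.drop (k + 1) = [] := List.drop_eq_nil_of_le (by omega)
        simp [hnil, pvPairA, hc]
      · have hkne : (k : Int) ≠ (cs.length : Int) - 1 := by omega
        have : splitNewLineStep cs (w, o) (k : Int) = (w ++ [cs[k]], o) := by
          unfold splitNewLineStep
          rw [hget, if_pos hc, if_neg hkne]
        rw [this, show ((k : Int) + 1) = ((k + 1 : Nat) : Int) by push_cast; ring,
          ih (k + 1) (by omega) (w ++ [cs[k]]) o]
        have hne : cs.drop (k + 1) ≠ [] := by
          simp only [ne_eq, List.drop_eq_nil_iff]; omega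
        simp [pvPairA, hc, hne]

-- ===== VERDICT (by name: the statement is the Claim_ definition above) =====
theorem splitNewLine_spec : Claim_equal_splitNewLine := by
  intro file _
  unfold Spec_splitNewLine splitNewLine splitNewLine_alt
  simp only [pvSplitOn_eq]
  generalize file.toList = cs
  rw [show ((0 : Int)) = ((0 : Nat) : Int) from rfl,
    pvFoldA_eq cs cs.length 0 rfl [] []]
  simp only [List.drop_zero]
  cases hcs : cs with
  | nil => simp [pvPairA, pvSegs]
  | cons c rest =>
    rw [← hcs, pvPairA_snd cs [] [] (by simp [hcs])]
    cases hs : pvSegs cs with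
    | nil => exact absurd hs (pvSegs_ne_nil cs)
    | cons a b => simp [pvConsHead, pvPopEmpty]
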